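-- pv_equiv track=rewrite | github.com/mhleethomas/first_repository | SC001_Assignment3/similarity.py | match_dna
-- ===== SOURCE A (Python) =====
-- def match_dna(long_sequence, short_sequence):
--     """
--     :param long_sequence: str, the sequence which the user wants to match (long)
--     :param short_sequence: str, the sequence which the user wants to match (short)
--     return max_score_sequence: str, the matched sequence with highest similarity
--     this function compares every segment of the long sequence with the short sequence
--     and returns the segment with the highest similarity
--     """
--     max_score = 0
--     max_score_sequence = ""
--     for i in range(len(long_sequence) - len(short_sequence) + 1):
--         long_sequence_sliced = long_sequence[i:i + len(short_sequence)]
--         """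
--         for loop scope: cut the long sequence into segments,
--         e.g.:
--             long sequence == "ABCDDCBA"
--             short sequence == "BAD", length of short sequence is 3
--             segments == "ABC", "BCD", "CDD", "DDC", "DCB", "CBA"
--         number of segments == length of long sequence - length of short sequence + 1
--         """
--         score = 0
--
--         for j in range(len(short_sequence)):
--             # for loop scope: compare every nitrogen base in the sliced long sequence with the short sequence
--             if long_sequence_sliced[j] == short_sequence[j]:
--                 # True scope: nitrogen bases in these two sequence are the same, score + 1
--                 score += 1
--         if score > max_score:
--             # True scope: current score is higher than current max score, assign new max score
--             max_score = score
--             max_score_sequence = long_sequence_sliced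
--     return max_score_sequence
-- ===== SOURCE B (Python) =====
-- def _bisect_left(a, x):
--     lo, hi = 0, len(a)
--     while lo < hi:
--         mid = (lo + hi) // 2
--         if a[mid] < x:
--             lo = mid + 1
--         else:
--             hi = mid
--     return lo
--
--
-- def _bisect_right(a, x):
--     lo, hi = 0, len(a)
--     while lo < hi:
--         mid = (lo + hi) // 2
--         if a[mid] <= x:
--             lo = mid + 1
--         else:
--             hi = mid
--     return lo
--
--
-- def match_dna(long_sequence, short_sequence):
--     n, m = len(long_sequence), len(short_sequence)
--     if m > n:
--         return ""
--     w = n - m + 1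
--     offsets = {}
--     for j, c in enumerate(short_sequence):
--         offsets.setdefault(c, []).append(j)
--     counts = [0] * w
--     for p, c in enumerate(long_sequence):
--         off = offsets.get(c, ())
--         lo = _bisect_left(off, p - w + 1)
--         hi = _bisect_right(off, p)
--         for j in off[lo:hi]:
--             i = p - j
--             if 0 <= i < w:
--                 counts[i] += 1
--     best, best_i = 0, -1
--     for i, s in enumerate(counts):
--         if s > best:
--             best, best_i = s, i
--     return "" if best_i < 0 else long_sequence[best_i:best_i + m]
-- ===== Notes on version B (the rewrite author's own statement) =====
-- stated objective: alternative
-- what changed: Instead of rescoring every window, B builds a dict from each short-sequence character to its sorted offset list, scans the long sequence once adding each character occurrence's contribution (restricted by binary search to the offsets whose window exists) into a cross-correlation counts table indexed by window start, then picks the earliest maximum count in a final pass.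
import Mathlib
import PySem

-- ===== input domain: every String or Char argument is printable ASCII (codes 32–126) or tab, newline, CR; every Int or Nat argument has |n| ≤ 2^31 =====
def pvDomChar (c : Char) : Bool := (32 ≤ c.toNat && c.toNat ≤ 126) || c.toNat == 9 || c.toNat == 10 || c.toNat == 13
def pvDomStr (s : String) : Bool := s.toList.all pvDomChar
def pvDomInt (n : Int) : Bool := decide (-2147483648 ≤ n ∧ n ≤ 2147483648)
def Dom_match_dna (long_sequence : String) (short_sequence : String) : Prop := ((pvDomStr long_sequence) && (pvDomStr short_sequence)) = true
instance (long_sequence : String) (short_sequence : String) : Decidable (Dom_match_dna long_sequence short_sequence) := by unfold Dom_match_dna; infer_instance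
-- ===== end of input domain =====

-- B replaces A's per-window rescoring with a character→offsets dict, one
-- occurrence-driven scan of the long sequence (binary search restricts each step
-- to the offsets whose window exists) accumulating a counts table of window
-- match-counts, and a final earliest-maximum pass (objective: alternative).

-- ===== PORT A =====
def match_dna (long_sequence : String) (short_sequence : String) : String :=
  (List.foldl
    (fun (st : Int × String) i =>
      let long_sequence_sliced := PySem.Str.slice long_sequence (some i) (some (i + PySem.Str.len short_sequence))
      let score := List.foldl
        (fun sc j =>
          if PySem.Str.pyGet? long_sequence_sliced j == PySem.Str.pyGet? short_sequence j then sc + 1 else sc)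
        (0 : Int) (PySem.List.pyRange 0 (PySem.Str.len short_sequence) 1)
      if st.1 < score then (score, long_sequence_sliced) else st)
    ((0 : Int), "")
    (PySem.List.pyRange 0 (PySem.Str.len long_sequence - PySem.Str.len short_sequence + 1) 1)).2

-- port of B's _bisect_left while-loop
def pyBisectLeftAux (a : List Int) (x : Int) (lo hi : Int) : Int :=
  if h : lo < hi then
    let mid := PySem.Int.floordiv (lo + hi) 2
    if PySem.List.pyGetD a mid 0 < x then pyBisectLeftAux a x (mid + 1) hi
    else pyBisectLeftAux a x lo mid
  else lo
termination_by (hi - lo).toNat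
decreasing_by
  · have _hb := PySem.Int.floordiv_two_mid_bounds (le_of_lt h)
    omega
  · have _hb := PySem.Int.floordiv_two_mid_bounds (le_of_lt h)
    have hlt : PySem.Int.floordiv (lo + hi) 2 < hi := by
      rw [PySem.Int.floordiv_lt_iff_lt_mul (by norm_num)]
      omega
    omega

def pyBisectLeft (a : List Int) (x : Int) : Int := pyBisectLeftAux a x 0 (PySem.List.len a)

def pyBisectRightAux (a : List Int) (x : Int) (lo hi : Int) : Int :=
  if h : lo < hi then
    let mid := PySem.Int.floordiv (lo + hi) 2
    if PySem.List.pyGetD a mid 0 ≤ x then pyBisectRightAux a x (mid + 1) hi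
    else pyBisectRightAux a x lo mid
  else lo
termination_by (hi - lo).toNat
decreasing_by
  · have _hb := PySem.Int.floordiv_two_mid_bounds (le_of_lt h)
    omega
  · have _hb := PySem.Int.floordiv_two_mid_bounds (le_of_lt h)
    have hlt : PySem.Int.floordiv (lo + hi) 2 < hi := by
      rw [PySem.Int.floordiv_lt_iff_lt_mul (by norm_num)]
      omega
    omega

def pyBisectRight (a : List Int) (x : Int) : Int := pyBisectRightAux a x 0 (PySem.List.len a)

-- ===== PORT B =====
def match_dna_alt (long_sequence : String) (short_sequence : String) : String :=
  let n := PySem.Str.len long_sequence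
  let m := PySem.Str.len short_sequence
  if m > n then "" else
  let w := n - m + 1
  -- offsets: char -> list of positions in short_sequence (setdefault(c, []).append(j))
  let offsets := List.foldl
    (fun (d : PySem.Dict Char (List Int)) (jc : Int × Char) => d.modify jc.2 [] (· ++ [jc.1]))
    PySem.Dict.empty (PySem.List.enumerate short_sequence.toList 0)
  -- counts[i] accumulates matches contributed to window i, in one scan of long_sequence
  let counts := List.foldl
    (fun (cs : List Int) (pc : Int × Char) =>
      let off := offsets.getD pc.2 []
      List.foldl
        (fun (cs : List Int) (j : Int) =>
          let i := pc.1 - j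
          if 0 ≤ i ∧ i < w then PySem.List.pySetD cs i (PySem.List.pyGetD cs i 0 + 1) else cs)
        cs (PySem.List.slice off (some (pyBisectLeft off (pc.1 - w + 1))) (some (pyBisectRight off pc.1))))
    (List.replicate w.toNat (0 : Int)) (PySem.List.enumerate long_sequence.toList 0)
  -- earliest strict maximum
  let best := List.foldl
    (fun (b : Int × Int) (is : Int × Int) => if b.1 < is.2 then (is.2, is.1) else b)
    ((0 : Int), (-1 : Int)) (PySem.List.enumerate counts 0)
  if best.2 < 0 then "" else PySem.Str.slice long_sequence (some best.2) (some (best.2 + m))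


-- ===== PRECONDITION & SPEC =====
def Spec_match_dna (long_sequence : String) (short_sequence : String) (out : String) : Prop := out = match_dna_alt long_sequence short_sequence
instance (long_sequence : String) (short_sequence : String) (out : String) : Decidable (Spec_match_dna long_sequence short_sequence out) := by unfold Spec_match_dna; infer_instance

-- ===== CLAIM (what is proved, stated in full; the proofs are below) =====
def Claim_equal_match_dna : Prop := ∀ (long_sequence : String) (short_sequence : String), Dom_match_dna long_sequence short_sequence → Spec_match_dna long_sequence short_sequence (match_dna long_sequence short_sequence)

-- ===== LEMMAS AND PROOFS =====

def pvScore (l s : List Char) (k : Nat) : Nat :=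
  (List.range s.length).countP (fun j => l[k+j]? == s[j]?)

def pvOffs (s : List Char) (c : Char) : List Int :=
  ((PySem.List.enumerate s 0).filter (fun jc => jc.2 == c)).map (·.1)

lemma pvOffsetsEq (s : List Char) (c : Char) :
    (List.foldl (fun (d : PySem.Dict Char (List Int)) (jc : Int × Char) =>
        d.modify jc.2 [] (· ++ [jc.1])) PySem.Dict.empty (PySem.List.enumerate s 0)).getD c []
    = pvOffs s c := by
  have h : List.foldl (fun (d : PySem.Dict Char (List Int)) (jc : Int × Char) =>
        d.modify jc.2 [] (· ++ [jc.1])) PySem.Dict.empty (PySem.List.enumerate s 0)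
      = List.foldl (fun (d : PySem.Dict Char (List Int)) (p : Char × Int) =>
        d.modify p.1 [] (· ++ [p.2])) PySem.Dict.empty
        ((PySem.List.enumerate s 0).map (fun jc => (jc.2, jc.1))) := by
    rw [List.foldl_map]
  rw [h, PySem.Dict.getD_foldl_modify_append, List.filter_map]
  simp [pvOffs, List.map_map, Function.comp_def]

lemma pvOffsNodup (s : List Char) (c : Char) : (pvOffs s c).Nodup := by
  have hsub : List.Sublist (pvOffs s c) ((PySem.List.enumerate s 0).map (fun x => x.1)) :=
    List.Sublist.map _ List.filter_sublist
  have : ((PySem.List.enumerate s 0).map (fun x => x.1)).Nodup := by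
    rw [PySem.List.map_fst_enumerate]
    exact PySem.List.nodup_pyRange_one _ _
  exact this.sublist hsub

lemma pvMemOffs (s : List Char) (c : Char) (x : Int) :
    x ∈ pvOffs s c ↔ (0 ≤ x ∧ x.toNat < s.length ∧ s[x.toNat]? = some c) := by
  unfold pvOffs
  simp only [List.mem_map, List.mem_filter, PySem.List.mem_enumerate_iff]
  constructor
  · rintro ⟨⟨j, cc⟩, ⟨⟨k, hk, heq⟩, hc⟩, rfl⟩
    obtain ⟨rfl, rfl⟩ : j = 0 + (k : Int) ∧ cc = s[k] := Prod.mk.injEq .. ▸ heq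
    simp only [beq_iff_eq] at hc
    refine ⟨by omega, by simpa using hk, ?_⟩
    simp only [zero_add, Int.toNat_natCast]
    simp [List.getElem?_eq_getElem hk, hc]
  · rintro ⟨h0, hk, hg⟩
    refine ⟨((x, s[x.toNat]'hk)), ⟨⟨x.toNat, hk, by simp [h0]⟩, ?_⟩, rfl⟩
    simp only [beq_iff_eq]
    have := List.getElem?_eq_getElem hk
    rw [this] at hg
    injection hg

lemma pvOffsCount (s : List Char) (c : Char) (x : Int) :
    (pvOffs s c).count x = if 0 ≤ x ∧ x.toNat < s.length ∧ s[x.toNat]? = some c then 1 else 0 := by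
  by_cases h : 0 ≤ x ∧ x.toNat < s.length ∧ s[x.toNat]? = some c
  · rw [if_pos h]
    exact List.count_eq_one_of_mem (pvOffsNodup s c) ((pvMemOffs s c x).mpr h)
  · rw [if_neg h]
    exact List.count_eq_zero_of_not_mem (fun hm => h ((pvMemOffs s c x).mp hm))

lemma pvOffsSorted (s : List Char) (c : Char) : (pvOffs s c).Pairwise (· < ·) := by
  unfold pvOffs
  rw [List.pairwise_map]
  exact (PySem.List.pairwise_lt_enumerate s 0).filter _

lemma pvBisectLAux_spec (a : List Int) (hs : a.Pairwise (· < ·)) (x lo hi : Int)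
    (h0 : 0 ≤ lo) (h1 : lo ≤ hi) (h2 : hi ≤ (a.length : Int))
    (hlo : ∀ (i : Nat) (h : i < a.length), (i : Int) < lo → a[i] < x)
    (hhi : ∀ (i : Nat) (h : i < a.length), hi ≤ (i : Int) → x ≤ a[i]) :
    0 ≤ pyBisectLeftAux a x lo hi ∧ pyBisectLeftAux a x lo hi ≤ (a.length : Int) ∧
    (∀ (i : Nat) (h : i < a.length), (i : Int) < pyBisectLeftAux a x lo hi → a[i] < x) ∧
    (∀ (i : Nat) (h : i < a.length), pyBisectLeftAux a x lo hi ≤ (i : Int) → x ≤ a[i]) := by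
  fun_induction pyBisectLeftAux a x lo hi with
  | case1 lo hi h mid hcmp ih =>
    have hb := PySem.Int.floordiv_two_mid_bounds (le_of_lt h)
    have hlt : mid < hi := by
      show PySem.Int.floordiv (lo + hi) 2 < hi
      rw [PySem.Int.floordiv_lt_iff_lt_mul (by norm_num)]
      omega
    have hmr : mid.toNat < a.length := by omega
    have hget : PySem.List.pyGetD a mid 0 = a[mid.toNat] :=
      PySem.List.pyGetD_eq_getElem a 0 (by omega) (by omega)
    apply ih (by omega) (by omega) h2
    · intro i hi' hilt
      rcases Nat.lt_or_ge i mid.toNat with hc | hc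
      · calc a[i] < a[mid.toNat] := List.pairwise_iff_getElem.mp hs i mid.toNat hi' hmr hc
          _ < x := hget ▸ hcmp
      · have : i = mid.toNat := by omega
        subst this
        exact hget ▸ hcmp
    · exact hhi
  | case2 lo hi h mid hcmp ih =>
    have hb := PySem.Int.floordiv_two_mid_bounds (le_of_lt h)
    have hlt : mid < hi := by
      show PySem.Int.floordiv (lo + hi) 2 < hi
      rw [PySem.Int.floordiv_lt_iff_lt_mul (by norm_num)]
      omega
    have hmr : mid.toNat < a.length := by omega
    have hget : PySem.List.pyGetD a mid 0 = a[mid.toNat] :=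
      PySem.List.pyGetD_eq_getElem a 0 (by omega) (by omega)
    apply ih h0 (by omega) (by omega) hlo
    intro i hi' hge
    have hax : x ≤ a[mid.toNat] := by rw [← hget]; omega
    rcases Nat.lt_or_ge mid.toNat i with hc | hc
    · exact le_of_lt (lt_of_le_of_lt hax (List.pairwise_iff_getElem.mp hs mid.toNat i hmr hi' hc))
    · have : i = mid.toNat := by omega
      subst this
      exact hax
  | case3 lo hi h =>
    exact ⟨h0, by omega, fun i hi' hlt => hlo i hi' (by omega), fun i hi' hge => hhi i hi' (by omega)⟩

lemma pvBisectRAux_spec (a : List Int) (hs : a.Pairwise (· < ·)) (x lo hi : Int)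
    (h0 : 0 ≤ lo) (h1 : lo ≤ hi) (h2 : hi ≤ (a.length : Int))
    (hlo : ∀ (i : Nat) (h : i < a.length), (i : Int) < lo → a[i] ≤ x)
    (hhi : ∀ (i : Nat) (h : i < a.length), hi ≤ (i : Int) → x < a[i]) :
    0 ≤ pyBisectRightAux a x lo hi ∧ pyBisectRightAux a x lo hi ≤ (a.length : Int) ∧
    (∀ (i : Nat) (h : i < a.length), (i : Int) < pyBisectRightAux a x lo hi → a[i] ≤ x) ∧
    (∀ (i : Nat) (h : i < a.length), pyBisectRightAux a x lo hi ≤ (i : Int) → x < a[i]) := by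
  fun_induction pyBisectRightAux a x lo hi with
  | case1 lo hi h mid hcmp ih =>
    have hb := PySem.Int.floordiv_two_mid_bounds (le_of_lt h)
    have hlt : mid < hi := by
      show PySem.Int.floordiv (lo + hi) 2 < hi
      rw [PySem.Int.floordiv_lt_iff_lt_mul (by norm_num)]
      omega
    have hmr : mid.toNat < a.length := by omega
    have hget : PySem.List.pyGetD a mid 0 = a[mid.toNat] :=
      PySem.List.pyGetD_eq_getElem a 0 (by omega) (by omega)
    apply ih (by omega) (by omega) h2
    · intro i hi' hilt
      rcases Nat.lt_or_ge i mid.toNat with hc | hc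
      · exact le_of_lt (lt_of_lt_of_le (List.pairwise_iff_getElem.mp hs i mid.toNat hi' hmr hc)
          (hget ▸ hcmp))
      · have : i = mid.toNat := by omega
        subst this
        exact hget ▸ hcmp
    · exact hhi
  | case2 lo hi h mid hcmp ih =>
    have hb := PySem.Int.floordiv_two_mid_bounds (le_of_lt h)
    have hlt : mid < hi := by
      show PySem.Int.floordiv (lo + hi) 2 < hi
      rw [PySem.Int.floordiv_lt_iff_lt_mul (by norm_num)]
      omega
    have hmr : mid.toNat < a.length := by omega
    have hget : PySem.List.pyGetD a mid 0 = a[mid.toNat] :=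
      PySem.List.pyGetD_eq_getElem a 0 (by omega) (by omega)
    apply ih h0 (by omega) (by omega) hlo
    intro i hi' hge
    have hax : x < a[mid.toNat] := by rw [← hget]; omega
    rcases Nat.lt_or_ge mid.toNat i with hc | hc
    · exact lt_trans hax (List.pairwise_iff_getElem.mp hs mid.toNat i hmr hi' hc)
    · have : i = mid.toNat := by omega
      subst this
      exact hax
  | case3 lo hi h =>
    exact ⟨h0, by omega, fun i hi' hlt => hlo i hi' (by omega), fun i hi' hge => hhi i hi' (by omega)⟩

lemma pvBisectL_spec (a : List Int) (hs : a.Pairwise (· < ·)) (x : Int) :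
    0 ≤ pyBisectLeft a x ∧ pyBisectLeft a x ≤ (a.length : Int) ∧
    (∀ (i : Nat) (h : i < a.length), (i : Int) < pyBisectLeft a x → a[i] < x) ∧
    (∀ (i : Nat) (h : i < a.length), pyBisectLeft a x ≤ (i : Int) → x ≤ a[i]) := by
  unfold pyBisectLeft
  rw [PySem.List.len_eq]
  exact pvBisectLAux_spec a hs x 0 _ le_rfl (by omega) le_rfl
    (fun i hi' hlt => absurd hlt (by omega)) (fun i hi' hge => absurd hge (by omega))

lemma pvBisectR_spec (a : List Int) (hs : a.Pairwise (· < ·)) (x : Int) :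
    0 ≤ pyBisectRight a x ∧ pyBisectRight a x ≤ (a.length : Int) ∧
    (∀ (i : Nat) (h : i < a.length), (i : Int) < pyBisectRight a x → a[i] ≤ x) ∧
    (∀ (i : Nat) (h : i < a.length), pyBisectRight a x ≤ (i : Int) → x < a[i]) := by
  unfold pyBisectRight
  rw [PySem.List.len_eq]
  exact pvBisectRAux_spec a hs x 0 _ le_rfl (by omega) le_rfl
    (fun i hi' hlt => absurd hlt (by omega)) (fun i hi' hge => absurd hge (by omega))

-- count of a value t ∈ [x, y] is unchanged by restricting a sorted list to its [bisect_left x, bisect_right y) slice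
lemma pvSliceCount (a : List Int) (hs : a.Pairwise (· < ·)) (x y t : Int)
    (hxt : x ≤ t) (hty : t ≤ y) :
    (PySem.List.slice a (some (pyBisectLeft a x)) (some (pyBisectRight a y))).count t
      = a.count t := by
  obtain ⟨hl0, hl1, hl2, hl3⟩ := pvBisectL_spec a hs x
  obtain ⟨hr0, hr1, hr2, hr3⟩ := pvBisectR_spec a hs y
  have hle : pyBisectLeft a x ≤ pyBisectRight a y := by
    by_contra hcon
    have hbr : (pyBisectRight a y).toNat < a.length := by omega
    have h1 := hl2 (pyBisectRight a y).toNat hbr (by omega)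
    have h2 := hr3 (pyBisectRight a y).toNat hbr (by omega)
    omega
  set bl := (pyBisectLeft a x).toNat with hbl
  set br := (pyBisectRight a y).toNat with hbr
  have hslice : PySem.List.slice a (some (pyBisectLeft a x)) (some (pyBisectRight a y))
      = (a.drop bl).take (br - bl) := by
    rw [show pyBisectLeft a x = ((bl : Nat) : Int) by omega,
      show pyBisectRight a y = ((bl : Nat) : Int) + ((br - bl : Nat) : Int) by omega]
    exact PySem.List.slice_natCast_add a bl (br - bl)
  have hdecomp : a = a.take bl ++ ((a.drop bl).take (br - bl) ++ a.drop br) := by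
    rw [show a.drop br = ((a.drop bl).drop (br - bl)) by rw [List.drop_drop]; congr 1; omega,
      List.take_append_drop, List.take_append_drop]
  have hpre : (a.take bl).count t = 0 := by
    rw [List.count_eq_zero]
    intro hmem
    obtain ⟨i, hi', hv⟩ := List.mem_iff_getElem.mp hmem
    have hil : i < a.length := by
      have := hi'; simp [List.length_take] at this; omega
    have := hl2 i hil (by have := hi'; simp [List.length_take] at this; omega)
    rw [List.getElem_take] at hv
    omega
  have hsuf : (a.drop br).count t = 0 := by
    rw [List.count_eq_zero]
    intro hmem
    obtain ⟨i, hi', hv⟩ := List.mem_iff_getElem.mp hmem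
    have hil : br + i < a.length := by
      have := hi'; simp [List.length_drop] at this; omega
    have := hr3 (br + i) hil (by omega)
    rw [List.getElem_drop] at hv
    omega
  rw [hslice]
  conv_rhs => rw [hdecomp]
  rw [List.count_append, List.count_append, hpre, hsuf]
  omega

def pvBumpF (w p : Int) : List Int → Int → List Int := fun cs j =>
  if 0 ≤ p - j ∧ p - j < w then PySem.List.pySetD cs (p - j) (PySem.List.pyGetD cs (p - j) 0 + 1) else cs

lemma pvBumpLen (w p : Int) (js : List Int) (cs : List Int) :
    (js.foldl (pvBumpF w p) cs).length = cs.length := by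
  induction js generalizing cs with
  | nil => rfl
  | cons j js ih =>
    simp only [List.foldl_cons]
    rw [ih]
    simp only [pvBumpF]
    split
    · exact PySem.List.length_pySetD _ _ _
    · rfl

lemma pvBumpGet (w p : Int) (js : List Int) (cs : List Int) (hw : (cs.length : Int) = w)
    (k : Nat) (hk : k < cs.length) :
    (js.foldl (pvBumpF w p) cs)[k]?.getD 0 = cs[k]?.getD 0 + (js.count (p - (k : Int)) : Int) := by
  induction js generalizing cs with
  | nil => simp
  | cons j js ih =>
    simp only [List.foldl_cons, List.count_cons]
    by_cases hg : 0 ≤ p - j ∧ p - j < w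
    · have hset : pvBumpF w p cs j = cs.set (p - j).toNat (PySem.List.pyGetD cs (p - j) 0 + 1) := by
        simp only [pvBumpF, if_pos hg, PySem.List.pySetD_of_nonneg _ _ hg.1]
      rw [hset, ih _ (by simp [hw]) (by simpa using hk)]
      rw [List.getElem?_set]
      by_cases he : p - j = (k : Int)
      · have ha : (p - j).toNat = k := by omega
        have hb : (j == p - (k : Int)) = true := by simp; omega
        rw [ha, if_pos rfl, if_pos hk, PySem.List.pyGetD_of_nonneg _ _ hg.1, ha]
        rw [List.getD_eq_getElem?_getD]
        simp [hb]
        omega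
      · have ha : ¬((p - j).toNat = k) := by omega
        have hb : (j == p - (k : Int)) = false := by simp; omega
        rw [if_neg ha]
        simp [hb]
    · have hcs : pvBumpF w p cs j = cs := by simp only [pvBumpF, if_neg hg]
      have hb : (j == p - (k : Int)) = false := by
        simp only [beq_eq_false_iff_ne, ne_eq]
        intro hej
        exact hg ⟨by omega, by omega⟩
      rw [hcs, ih _ hw hk]
      simp [hb]
def pvOuterF (w : Int) (off : Int → Char → List Int) : List Int → (Int × Char) → List Int :=
  fun cs pc => (off pc.1 pc.2).foldl (pvBumpF w pc.1) cs

lemma pvOuterLen (w : Int) (off : Int → Char → List Int) (ps : List (Int × Char)) (cs : List Int) :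
    (ps.foldl (pvOuterF w off) cs).length = cs.length := by
  induction ps generalizing cs with
  | nil => rfl
  | cons pc ps ih => simp only [List.foldl_cons]; rw [ih, pvOuterF, pvBumpLen]

lemma pvOuterGet (w : Int) (off : Int → Char → List Int) (ps : List (Int × Char)) (cs : List Int)
    (hw : (cs.length : Int) = w) (k : Nat) (hk : k < cs.length) :
    (ps.foldl (pvOuterF w off) cs)[k]?.getD 0
      = cs[k]?.getD 0 + ((ps.map (fun pc => (((off pc.1 pc.2).count (pc.1 - (k : Int)) : Nat) : Int))).sum) := by
  induction ps generalizing cs with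
  | nil => simp
  | cons pc ps ih =>
    simp only [List.foldl_cons, List.map_cons, List.sum_cons]
    have hlen : (pvOuterF w off cs pc).length = cs.length := pvBumpLen ..
    rw [ih _ (by rw [hlen]; exact hw) (by rw [hlen]; exact hk)]
    rw [pvOuterF, pvBumpGet w pc.1 _ cs hw k hk]
    ring

lemma pvSumEq (l s : List Char) (k : Nat) (hkm : k + s.length ≤ l.length) :
    ((PySem.List.enumerate l 0).map
        (fun pc => (((pvOffs s pc.2).count (pc.1 - (k : Int)) : Nat) : Int))).sum
    = (pvScore l s k : Int) := by
  have hen : PySem.List.enumerate l 0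
      = (List.range l.length).map (fun (p : Nat) => ((p : Int), PySem.List.pyGetD l (p : Int) 'A')) := by
    rw [PySem.List.enumerate_eq_map_pyRange l 'A', PySem.List.len_eq,
      PySem.List.pyRange_zero_natCast, List.map_map]
    rfl
  rw [hen, List.map_map]
  show ((List.range l.length).map
      (fun (p : Nat) => (((pvOffs s (PySem.List.pyGetD l (p : Int) 'A')).count ((p : Int) - (k : Int)) : Nat) : Int))).sum
    = (pvScore l s k : Int)
  have hsplit : List.range l.length
      = (List.range k ++ (List.range s.length).map (k + ·))
        ++ (List.range (l.length - k - s.length)).map ((k + s.length) + ·) := by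
    have hn : l.length = (k + s.length) + (l.length - k - s.length) := by omega
    calc List.range l.length
        = List.range ((k + s.length) + (l.length - k - s.length)) := by rw [← hn]
      _ = _ := by rw [List.range_add, List.range_add]
  rw [hsplit, List.map_append, List.map_append, List.sum_append, List.sum_append,
    List.map_map, List.map_map]
  have h1 : ((List.range k).map
      (fun (p : Nat) => (((pvOffs s (PySem.List.pyGetD l (p : Int) 'A')).count ((p : Int) - (k : Int)) : Nat) : Int))).sum = 0 := by
    apply List.sum_eq_zero
    intro x hx
    simp only [List.mem_map, List.mem_range] at hx
    obtain ⟨p, hp, rfl⟩ := hx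
    rw [pvOffsCount, if_neg (by rintro ⟨h0, -⟩; omega)]
    rfl
  have h3 : ((List.range (l.length - k - s.length)).map
      ((fun (p : Nat) => (((pvOffs s (PySem.List.pyGetD l (p : Int) 'A')).count ((p : Int) - (k : Int)) : Nat) : Int)) ∘ ((k + s.length) + ·))).sum = 0 := by
    apply List.sum_eq_zero
    intro x hx
    simp only [List.mem_map, List.mem_range, Function.comp_apply] at hx
    obtain ⟨q, hq, rfl⟩ := hx
    rw [pvOffsCount, if_neg (by rintro ⟨h0, h1, -⟩; omega)]
    rfl
  rw [h1, h3, zero_add, add_zero]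
  have hmid : (List.range s.length).map
      ((fun (p : Nat) => (((pvOffs s (PySem.List.pyGetD l (p : Int) 'A')).count ((p : Int) - (k : Int)) : Nat) : Int)) ∘ (k + ·))
      = (List.range s.length).map (fun j => if l[k+j]? == s[j]? then (1 : Int) else 0) := by
    apply List.map_congr_left
    intro j hj
    simp only [List.mem_range] at hj
    simp only [Function.comp_apply]
    have hkj : k + j < l.length := by omega
    have hget : PySem.List.pyGetD l ((k + j : Nat) : Int) 'A' = l[k+j] := by
      rw [PySem.List.pyGetD_natCast]
      exact List.getD_eq_getElem l 'A' hkj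
    rw [hget, pvOffsCount]
    have htn : (((k + j : Nat) : Int) - (k : Int)).toNat = j := by omega
    have hc : (0 ≤ ((k + j : Nat) : Int) - (k : Int) ∧ (((k + j : Nat) : Int) - (k : Int)).toNat < s.length
        ∧ s[(((k + j : Nat) : Int) - (k : Int)).toNat]? = some l[k+j])
        ↔ (s[j]? = some l[k+j]) := by
      rw [htn]
      constructor
      · rintro ⟨-, -, h⟩; exact h
      · intro h; exact ⟨by omega, hj, h⟩
    rw [List.getElem?_eq_getElem hkj]
    by_cases hs : s[j]? = some l[k+j]
    · rw [if_pos (hc.mpr hs), hs]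
      simp
    · rw [if_neg (fun hh => hs (hc.mp hh))]
      have : ¬ (some l[k+j] == s[j]?) = true := by
        simp only [beq_iff_eq]
        intro hh; exact hs hh.symm
      simp [this]
  rw [hmid]
  rw [PySem.List.sum_map_ite_one_zero]
  rfl

lemma pvWindowScoreA (L S : String) (i : Int) (h0 : 0 ≤ i) :
    List.foldl
      (fun sc j =>
        if PySem.Str.pyGet? (PySem.Str.slice L (some i) (some (i + PySem.Str.len S))) j ==
            PySem.Str.pyGet? S j then sc + 1 else sc)
      (0 : Int) (PySem.List.pyRange 0 (PySem.Str.len S) 1)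
    = (pvScore L.toList S.toList i.toNat : Int) := by
  lift i to Nat using h0 with a
  have hu : (PySem.Str.slice L (some (a : Int)) (some ((a : Int) + (S.toList.length : Int)))).toList
      = (L.toList.drop a).take S.toList.length := by
    rw [PySem.Str.toList_slice, PySem.Chars.slice_eq_listSlice, PySem.List.slice_natCast_add]
  rw [PySem.List.foldl_count_if
    (fun j => PySem.Str.pyGet? (PySem.Str.slice L (some (a : Int)) (some ((a : Int) + PySem.Str.len S))) j ==
      PySem.Str.pyGet? S j)]
  rw [zero_add, PySem.Str.len_eq, PySem.List.pyRange_zero_natCast, List.countP_map]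
  unfold pvScore
  congr 1
  apply List.countP_congr
  intro j hj
  simp only [List.mem_range] at hj
  simp only [Function.comp_apply, PySem.Str.pyGet?_eq, PySem.Chars.pyGet?_eq_listPyGet?,
    PySem.List.pyGet?_natCast]
  rw [hu, List.getElem?_take, if_pos hj, List.getElem?_drop, Int.toNat_natCast]

lemma pvScan (seg : Int → String) (xs : List (Int × Int)) (hpos : ∀ q ∈ xs, 0 ≤ q.1)
    (stA : Int × String) (stB : Int × Int)
    (h1 : stA.1 = stB.1) (h2 : stB.2 < 0 → stA = (0, "")) (h3 : 0 ≤ stB.2 → stA.2 = seg stB.2) :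
    (xs.foldl (fun st q => if st.1 < q.2 then (q.2, seg q.1) else st) stA).1
      = (xs.foldl (fun b q => if b.1 < q.2 then (q.2, q.1) else b) stB).1
    ∧ ((xs.foldl (fun b q => if b.1 < q.2 then (q.2, q.1) else b) stB).2 < 0 →
        xs.foldl (fun st q => if st.1 < q.2 then (q.2, seg q.1) else st) stA = (0, ""))
    ∧ (0 ≤ (xs.foldl (fun b q => if b.1 < q.2 then (q.2, q.1) else b) stB).2 →
        (xs.foldl (fun st q => if st.1 < q.2 then (q.2, seg q.1) else st) stA).2
          = seg (xs.foldl (fun b q => if b.1 < q.2 then (q.2, q.1) else b) stB).2) := by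
  induction xs generalizing stA stB with
  | nil => exact ⟨h1, h2, h3⟩
  | cons q xs ih =>
    have hq : 0 ≤ q.1 := hpos q List.mem_cons_self
    have hpos' : ∀ r ∈ xs, 0 ≤ r.1 := fun r hr => hpos r (List.mem_cons_of_mem _ hr)
    simp only [List.foldl_cons]
    by_cases hlt : stA.1 < q.2
    · rw [if_pos hlt, if_pos (h1 ▸ hlt)]
      exact ih hpos' _ _ rfl (fun hneg => absurd hq (by omega)) (fun _ => rfl)
    · rw [if_neg hlt, if_neg (h1 ▸ hlt)]
      exact ih hpos' _ _ h1 h2 h3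

def pvSeg (L S : String) (i : Int) : String :=
  PySem.Str.slice L (some i) (some (i + PySem.Str.len S))

def pvXs (L S : String) : List (Int × Int) :=
  (PySem.List.pyRange 0 (PySem.Str.len L - PySem.Str.len S + 1) 1).map
    (fun i => (i, (pvScore L.toList S.toList i.toNat : Int)))

def pvOffDict (S : String) : PySem.Dict Char (List Int) :=
  List.foldl (fun (d : PySem.Dict Char (List Int)) (jc : Int × Char) =>
    d.modify jc.2 [] (· ++ [jc.1])) PySem.Dict.empty (PySem.List.enumerate S.toList 0)

def pvCounts (L S : String) : List Int :=
  (PySem.List.enumerate L.toList 0).foldl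
    (pvOuterF (PySem.Str.len L - PySem.Str.len S + 1)
      (fun p c =>
        PySem.List.slice ((pvOffDict S).getD c [])
          (some (pyBisectLeft ((pvOffDict S).getD c []) (p - (PySem.Str.len L - PySem.Str.len S + 1) + 1)))
          (some (pyBisectRight ((pvOffDict S).getD c []) p))))
    (List.replicate (PySem.Str.len L - PySem.Str.len S + 1).toNat (0 : Int))

lemma pvAfold (L S : String) :
    match_dna L S
      = ((pvXs L S).foldl
          (fun st q => if st.1 < q.2 then (q.2, pvSeg L S q.1) else st) ((0 : Int), "")).2 := by
  unfold match_dna pvXs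
  rw [List.foldl_map]
  congr 1
  refine PySem.List.foldl_congr_mem _ _ _ _ (fun acc i hi => ?_)
  obtain ⟨h0, h1⟩ := PySem.List.mem_pyRange_one.mp hi
  simp only [pvWindowScoreA L S i h0]
  rfl

lemma pvBalt (L S : String) :
    match_dna_alt L S
      = if PySem.Str.len S > PySem.Str.len L then ""
        else
          (let r := (PySem.List.enumerate (pvCounts L S) 0).foldl
            (fun (b : Int × Int) (is : Int × Int) => if b.1 < is.2 then (is.2, is.1) else b)
            ((0 : Int), (-1 : Int))
          if r.2 < 0 then "" else PySem.Str.slice L (some r.2) (some (r.2 + PySem.Str.len S))) := rfl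

lemma pvCountsLen (L S : String) :
    (pvCounts L S).length = (PySem.Str.len L - PySem.Str.len S + 1).toNat := by
  unfold pvCounts
  rw [pvOuterLen, List.length_replicate]

lemma pvCountsGet (L S : String) (hmn : ¬ PySem.Str.len S > PySem.Str.len L)
    (k : Nat) (hk : k < (PySem.Str.len L - PySem.Str.len S + 1).toNat) :
    (pvCounts L S)[k]?.getD 0 = (pvScore L.toList S.toList k : Int) := by
  have hw0 : (0 : Int) ≤ PySem.Str.len L - PySem.Str.len S + 1 := by
    simp only [PySem.Str.len_eq] at hmn ⊢; omega
  have hw : ((List.replicate (PySem.Str.len L - PySem.Str.len S + 1).toNat (0 : Int)).length : Int)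
      = PySem.Str.len L - PySem.Str.len S + 1 := by
    rw [List.length_replicate]; omega
  unfold pvCounts
  rw [pvOuterGet _ _ _ _ hw k (by rw [List.length_replicate]; exact hk)]
  have hinit : (List.replicate (PySem.Str.len L - PySem.Str.len S + 1).toNat (0 : Int))[k]?.getD 0
      = 0 := by
    rw [List.getElem?_replicate, if_pos hk]; rfl
  rw [hinit, zero_add]
  have hmap : (PySem.List.enumerate L.toList 0).map
        (fun pc => ((((fun p c =>
            PySem.List.slice ((pvOffDict S).getD c [])
              (some (pyBisectLeft ((pvOffDict S).getD c []) (p - (PySem.Str.len L - PySem.Str.len S + 1) + 1)))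
              (some (pyBisectRight ((pvOffDict S).getD c []) p))) pc.1 pc.2).count (pc.1 - (k : Int)) : Nat) : Int))
      = (PySem.List.enumerate L.toList 0).map
        (fun pc => (((pvOffs S.toList pc.2).count (pc.1 - (k : Int)) : Nat) : Int)) := by
    apply List.map_congr_left
    intro pc _
    simp only [pvOffDict, pvOffsetsEq]
    rw [pvSliceCount (pvOffs S.toList pc.2) (pvOffsSorted S.toList pc.2)
      (pc.1 - (PySem.Str.len L - PySem.Str.len S + 1) + 1) pc.1 (pc.1 - (k : Int))
      (by omega) (by omega)]
  rw [hmap, pvSumEq]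
  simp only [PySem.Str.len_eq] at hmn hk ⊢
  omega

lemma pvEnumCounts (L S : String) (hmn : ¬ PySem.Str.len S > PySem.Str.len L) :
    PySem.List.enumerate (pvCounts L S) 0 = pvXs L S := by
  have hw0 : (0 : Int) ≤ PySem.Str.len L - PySem.Str.len S + 1 := by
    simp only [PySem.Str.len_eq] at hmn ⊢; omega
  rw [PySem.List.enumerate_eq_map_pyRange (pvCounts L S) 0, PySem.List.len_eq, pvCountsLen]
  unfold pvXs
  rw [show (((PySem.Str.len L - PySem.Str.len S + 1).toNat : Int))
      = PySem.Str.len L - PySem.Str.len S + 1 by omega]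
  apply List.map_congr_left
  intro i hi
  obtain ⟨h0, h1⟩ := PySem.List.mem_pyRange_one.mp hi
  have hk : i.toNat < (PySem.Str.len L - PySem.Str.len S + 1).toNat := by omega
  rw [PySem.List.pyGetD_of_nonneg _ _ h0, List.getD_eq_getElem?_getD, pvCountsGet L S hmn i.toNat hk]

lemma pvMain (L S : String) : match_dna L S = match_dna_alt L S := by
  by_cases hmn : PySem.Str.len S > PySem.Str.len L
  · have hA : match_dna L S = "" := by
      unfold match_dna
      rw [PySem.List.pyRange_one_eq_nil (a := 0) (b := PySem.Str.len L - PySem.Str.len S + 1)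
        (by simp only [PySem.Str.len_eq] at hmn ⊢; omega)]
      rfl
    rw [hA, pvBalt, if_pos hmn]
  · rw [pvAfold, pvBalt, if_neg hmn, pvEnumCounts L S hmn]
    have hpos : ∀ q ∈ pvXs L S, 0 ≤ q.1 := by
      intro q hq
      obtain ⟨i, hi, rfl⟩ := List.mem_map.mp hq
      exact (PySem.List.mem_pyRange_one.mp hi).1
    obtain ⟨hf, hneg, hge⟩ := pvScan (pvSeg L S) (pvXs L S) hpos ((0 : Int), "")
      ((0 : Int), (-1 : Int)) rfl (fun _ => rfl) (fun h => absurd h (by norm_num))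
    by_cases hbi : ((pvXs L S).foldl
        (fun (b : Int × Int) (is : Int × Int) => if b.1 < is.2 then (is.2, is.1) else b)
        ((0 : Int), (-1 : Int))).2 < 0
    · rw [if_pos hbi, hneg hbi]
    · rw [if_neg hbi, hge (by omega)]
      rfl

-- ===== VERDICT (by name: the statement is the Claim_ definition above) =====
theorem match_dna_spec : Claim_equal_match_dna := by
  intro L S _
  exact pvMain L S
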